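-- pv_equiv track=rewrite | github.com/JBuck1989/VBot | main.py | render_influence_star_bar
-- ===== SOURCE A (Python) =====
-- MAX_INFL_STARS_TOTAL = 5
--
-- def clamp(n: int, lo: int, hi: int) -> int:
--     return max(lo, min(hi, int(n)))
--
-- def render_influence_star_bar(neg: int, pos: int) -> str:
--     neg = clamp(int(neg), 0, MAX_INFL_STARS_TOTAL)
--     pos = clamp(int(pos), 0, MAX_INFL_STARS_TOTAL)
--
--     neg_slots = ["☆"] * MAX_INFL_STARS_TOTAL
--     for i in range(neg):
--         neg_slots[MAX_INFL_STARS_TOTAL - 1 - i] = "★"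
--
--     pos_slots = ["☆"] * MAX_INFL_STARS_TOTAL
--     for i in range(pos):
--         pos_slots[i] = "★"
--
--     return "- " + "".join(neg_slots) + " | " + "".join(pos_slots) + " +"
-- ===== SOURCE B (Python) =====
-- MAX_INFL_STARS_TOTAL = 5
--
-- # All six possible bars, indexed by the clamped star count (left-filled form).
-- _BARS = (
--     "\u2606\u2606\u2606\u2606\u2606",
--     "\u2605\u2606\u2606\u2606\u2606",
--     "\u2605\u2605\u2606\u2606\u2606",
--     "\u2605\u2605\u2605\u2606\u2606",
--     "\u2605\u2605\u2605\u2605\u2606",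
--     "\u2605\u2605\u2605\u2605\u2605",
-- )
--
-- def render_influence_star_bar(neg: int, pos: int) -> str:
--     n = max(0, min(MAX_INFL_STARS_TOTAL, int(neg)))
--     p = max(0, min(MAX_INFL_STARS_TOTAL, int(pos)))
--     # negative side is the mirror image of the table entry
--     return "- " + _BARS[n][::-1] + " | " + _BARS[p] + " +"
-- ===== Notes on version B (the rewrite author's own statement) =====
-- stated objective: alternative
-- what changed: Replaces A's list-of-slots with mutating fill loops by a precomputed literal lookup table of all six possible bars, indexed by the clamped count, with the negative bar obtained by reversing the table entry ([::-1]); no per-call bar construction.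
import Mathlib
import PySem

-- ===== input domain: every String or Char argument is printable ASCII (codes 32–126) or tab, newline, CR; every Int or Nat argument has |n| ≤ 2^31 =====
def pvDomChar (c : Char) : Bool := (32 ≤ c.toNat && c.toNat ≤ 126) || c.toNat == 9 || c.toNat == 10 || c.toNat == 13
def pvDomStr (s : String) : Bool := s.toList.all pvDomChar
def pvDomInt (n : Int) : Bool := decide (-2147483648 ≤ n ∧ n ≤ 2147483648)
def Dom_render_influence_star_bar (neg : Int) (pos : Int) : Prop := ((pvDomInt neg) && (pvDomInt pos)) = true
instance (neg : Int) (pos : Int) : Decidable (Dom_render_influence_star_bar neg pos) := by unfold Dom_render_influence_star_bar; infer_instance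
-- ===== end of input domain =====

-- B replaces A's slot-list with fill loops by a precomputed lookup table of all six bars (negative side = reversed table entry); objective: alternative.

def MAX_INFL_STARS_TOTAL : Int := 5

-- ===== PORT A =====
-- A's 'clamp' helper (int() is identity on ints)
def pyClamp (n lo hi : Int) : Int := max lo (min hi n)

-- indices written by the loops are always in range (counts are clamped to [0,5]), so .toNat on the index is exact here
def render_influence_star_bar (neg : Int) (pos : Int) : String :=
  let neg := pyClamp neg 0 MAX_INFL_STARS_TOTAL
  let pos := pyClamp pos 0 MAX_INFL_STARS_TOTAL
  let neg_slots := List.replicate MAX_INFL_STARS_TOTAL.toNat "☆"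
  let neg_slots := (PySem.List.pyRange 0 neg 1).foldl
    (fun s i => s.set (MAX_INFL_STARS_TOTAL - 1 - i).toNat "★") neg_slots
  let pos_slots := List.replicate MAX_INFL_STARS_TOTAL.toNat "☆"
  let pos_slots := (PySem.List.pyRange 0 pos 1).foldl
    (fun s i => s.set i.toNat "★") pos_slots
  "- " ++ String.join neg_slots ++ " | " ++ String.join pos_slots ++ " +"

-- ===== PORT B =====
-- B's literal table of all six bars, indexed by the clamped count
def BARS : List String := ["☆☆☆☆☆", "★☆☆☆☆", "★★☆☆☆", "★★★☆☆", "★★★★☆", "★★★★★"]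

-- Python s[::-1] on a string
def strRev (s : String) : String := String.mk s.toList.reverse

def render_influence_star_bar_alt (neg : Int) (pos : Int) : String :=
  let n := max 0 (min MAX_INFL_STARS_TOTAL neg)
  let p := max 0 (min MAX_INFL_STARS_TOTAL pos)
  "- " ++ strRev (BARS.getD n.toNat "") ++ " | " ++ BARS.getD p.toNat "" ++ " +"

-- ===== PRECONDITION & SPEC =====
def Spec_render_influence_star_bar (neg : Int) (pos : Int) (out : String) : Prop := out = render_influence_star_bar_alt neg pos
instance (neg : Int) (pos : Int) (out : String) : Decidable (Spec_render_influence_star_bar neg pos out) := by unfold Spec_render_influence_star_bar; infer_instance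

-- ===== CLAIM =====
def Claim_equal_render_influence_star_bar : Prop := ∀ (neg : Int) (pos : Int), Dom_render_influence_star_bar neg pos → Spec_render_influence_star_bar neg pos (render_influence_star_bar neg pos)

-- ===== LEMMAS AND PROOFS =====
theorem clamp_bounds (n : Int) : 0 ≤ pyClamp n 0 MAX_INFL_STARS_TOTAL ∧ pyClamp n 0 MAX_INFL_STARS_TOTAL ≤ 5 := by
  unfold pyClamp MAX_INFL_STARS_TOTAL; omega

-- ===== VERDICT =====
theorem render_influence_star_bar_spec : Claim_equal_render_influence_star_bar := by
  intro neg pos _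
  unfold Spec_render_influence_star_bar render_influence_star_bar render_influence_star_bar_alt
  have hn := clamp_bounds neg
  have hp := clamp_bounds pos
  have en : max 0 (min MAX_INFL_STARS_TOTAL neg) = pyClamp neg 0 MAX_INFL_STARS_TOTAL := rfl
  have ep : max 0 (min MAX_INFL_STARS_TOTAL pos) = pyClamp pos 0 MAX_INFL_STARS_TOTAL := rfl
  rw [en, ep]
  generalize pyClamp neg 0 MAX_INFL_STARS_TOTAL = a at hn ⊢
  generalize pyClamp pos 0 MAX_INFL_STARS_TOTAL = b at hp ⊢
  obtain ⟨hn0, hn5⟩ := hn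
  obtain ⟨hp0, hp5⟩ := hp
  interval_cases a <;> interval_cases b <;> decide
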